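-- pv_equiv track=rewrite | github.com/Slovejoy/dnsmasq-pre2.76 | poc.py | biggen
-- ===== SOURCE A (Python) =====
-- def biggen(size):
--     # This function is for generating very large size packets
--     header = "c00c" + "000c" + "0001" + "0000003d" # The header is normal
--     psize = str(hex(size))[2:]
--     while(len(psize) != 4): # Grab the size and make sure it is the right length
--         psize = "0" + psize
--     header += psize
--     tmp = size
--     data = header
--     while(tmp > 63): # Separate everything by 64 bytes, data sections larger than 64 bytes are not in RFC1035
--         data += '3e' # Size of the data section
--         for _ in range(62): # Fill the data section
--             data += "69"
--         tmp = tmp - 63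
--     finlen = str(hex(tmp -2))[2:] # Account for the remainder
--     if(len(finlen) != 2):
--         finlen = "0" + finlen
--     data += finlen
--     for _ in range(tmp - 2):
--         data += '70'
--     data += '00' # End the qname section
--     return data
-- ===== SOURCE B (Python) =====
-- def biggen(size):
--     # Closed-form block count instead of A's subtract-63 loop; same output on all terminating inputs.
--     header = "c00c" + "000c" + "0001" + "0000003d"
--     psize = hex(size)[2:]
--     psize = "0" * (4 - len(psize)) + psize
--     k = max(0, -(-size // 63) - 1)   # number of full 63-byte blocks A's while-loop emits
--     tmp = size - 63 * k
--     finlen = hex(tmp - 2)[2:]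
--     if len(finlen) != 2:
--         finlen = "0" + finlen
--     return header + psize + ("3e" + "69" * 62) * k + finlen + "70" * max(0, tmp - 2) + "00"
-- ===== Notes on version B (the rewrite author's own statement) =====
-- stated objective: alternative
-- what changed: Replaces A's subtract-63 while-loop and per-byte append loops by a closed-form block count (ceil(size/63)-1) with string multiplication to emit all blocks and padding at once.
import Mathlib
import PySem

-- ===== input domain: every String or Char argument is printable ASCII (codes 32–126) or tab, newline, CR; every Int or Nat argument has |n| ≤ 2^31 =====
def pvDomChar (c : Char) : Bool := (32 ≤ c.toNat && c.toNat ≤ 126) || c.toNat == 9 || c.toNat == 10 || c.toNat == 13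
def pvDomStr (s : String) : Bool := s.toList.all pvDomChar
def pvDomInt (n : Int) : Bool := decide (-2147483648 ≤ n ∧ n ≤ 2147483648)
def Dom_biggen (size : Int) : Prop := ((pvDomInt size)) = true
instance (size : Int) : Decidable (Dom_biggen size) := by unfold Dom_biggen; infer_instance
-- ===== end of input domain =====

-- B replaces A's subtract-63 while-loop and per-byte append loops by a closed-form block
-- count with replicated segments emitted at once. Return value only; equal on all inputs where A terminates.

-- ===== PORT A =====

-- hex digit of n < 16, lowercase (as Python's hex())
def pvHexDigit (n : Nat) : Char := if n < 10 then Char.ofNat (48 + n) else Char.ofNat (87 + n)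

-- hex digits of a nonnegative integer, as produced by hex(n) after '0x'
def pvHexDigits (n : Nat) : List Char :=
  if n < 16 then [pvHexDigit n]
  else pvHexDigits (n / 16) ++ [pvHexDigit (n % 16)]
decreasing_by exact Nat.div_lt_self (by omega) (by omega)

-- str(hex(n))[2:] : for n ≥ 0 the digits; for n < 0 Python gives '-0x…'[2:] = 'x' + digits
def pvHexSlice2 (n : Int) : List Char :=
  if n < 0 then 'x' :: pvHexDigits n.natAbs else pvHexDigits n.toNat

-- while len(psize) != 4: psize = "0" + psize  — recursion on 4 - length; for length > 4 the
-- Python loop diverges (excluded by Pre_), here it stops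
def pvPad4 (s : List Char) : List Char :=
  if s.length < 4 then pvPad4 ('0' :: s) else s
decreasing_by simp; omega

-- while tmp > 63: data += '3e'; for _ in range(62): data += '69'; tmp -= 63
def pvBlockLoop (tmp : Int) (data : List Char) : Int × List Char :=
  if h : tmp > 63 then
    pvBlockLoop (tmp - 63) ((List.range 62).foldl (fun d _ => d ++ ['6', '9']) (data ++ ['3', 'e']))
  else (tmp, data)
termination_by tmp.toNat
decreasing_by omega

def biggen (size : Int) : String :=
  let header := "c00c".toList ++ "000c".toList ++ "0001".toList ++ "0000003d".toList
  let psize := pvPad4 (pvHexSlice2 size)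
  let header := header ++ psize
  let p := pvBlockLoop size header
  let tmp := p.1
  let data := p.2
  let finlen := pvHexSlice2 (tmp - 2)
  let finlen := if finlen.length ≠ 2 then '0' :: finlen else finlen
  let data := data ++ finlen
  let data := (List.range (tmp - 2).toNat).foldl (fun d _ => d ++ ['7', '0']) data
  String.ofList (data ++ ['0', '0'])

-- ===== PORT B =====

def biggen_alt (size : Int) : String :=
  let header := "c00c".toList ++ "000c".toList ++ "0001".toList ++ "0000003d".toList
  let psize0 := pvHexSlice2 size
  let psize := List.replicate (4 - psize0.length) '0' ++ psize0
  let k := max 0 (-(PySem.Int.floordiv (-size) 63) - 1)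
  let tmp := size - 63 * k
  let finlen := pvHexSlice2 (tmp - 2)
  let finlen := if finlen.length ≠ 2 then '0' :: finlen else finlen
  let blocks := List.flatten (List.replicate k.toNat (['3', 'e'] ++ List.flatten (List.replicate 62 ['6', '9'])))
  let sevens := List.flatten (List.replicate (max 0 (tmp - 2)).toNat ['7', '0'])
  String.ofList (header ++ psize ++ blocks ++ finlen ++ sevens ++ ['0', '0'])

-- ===== PRECONDITION & SPEC =====
-- Pre_ excludes exactly the inputs on which A's psize padding loop never terminates
-- (hex(size)[2:] longer than four characters, i.e. size outside the bounds below).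
def Pre_biggen (size : Int) : Prop := -4096 < size ∧ size < 65536
instance (size : Int) : Decidable (Pre_biggen size) := by unfold Pre_biggen; infer_instance
def pvWitness_biggen : Int := 200

def Spec_biggen (size : Int) (out : String) : Prop := out = biggen_alt size
instance (size : Int) (out : String) : Decidable (Spec_biggen size out) := by unfold Spec_biggen; infer_instance

-- ===== CLAIM (what is proved, stated in full; the proofs are below) =====
def Claim_equal_biggen : Prop := ∀ (size : Int), Dom_biggen size → Pre_biggen size → Spec_biggen size (biggen size)

-- ===== LEMMAS AND PROOFS =====

theorem foldl_range_append (n : Nat) (c s : List Char) :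
    (List.range n).foldl (fun d _ => d ++ c) s = s ++ List.flatten (List.replicate n c) := by
  induction n with
  | zero => simp
  | succ m ih =>
    rw [List.range_succ, List.foldl_append, ih, List.replicate_succ' (n := m)]
    simp

theorem pvHexDigits_length_le (n k : Nat) (hk : 1 ≤ k) (h : n < 16 ^ k) :
    (pvHexDigits n).length ≤ k := by
  induction n using Nat.strong_induction_on generalizing k with
  | _ n ih =>
    rw [pvHexDigits]
    split
    · simpa using hk
    · rename_i h16
      have hk2 : 2 ≤ k := by
        by_contra hc
        interval_cases k <;> omega
      have := ih (n / 16) (Nat.div_lt_self (by omega) (by omega)) (k - 1) (by omega)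
        (by
          have : n / 16 < 16 ^ k / 16 := by
            apply Nat.div_lt_div_of_lt_of_dvd
            · exact Dvd.intro (16 ^ (k - 1)) (by rw [← pow_succ']; congr 1; omega)
            · exact h
          calc n / 16 < 16 ^ k / 16 := this
            _ = 16 ^ (k - 1) := by
                have : (16:ℕ) ^ k = 16 ^ (k - 1) * 16 := by
                  rw [← pow_succ]; congr 1; omega
                rw [this, Nat.mul_div_cancel _ (by omega)]
          )
      simp only [List.length_append, List.length_cons, List.length_nil]
      omega

theorem pvHexSlice2_length_le (n : Int) (h : -4096 < n) (h2 : n < 65536) :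
    (pvHexSlice2 n).length ≤ 4 := by
  unfold pvHexSlice2
  split
  · have := pvHexDigits_length_le n.natAbs 3 (by omega) (by omega)
    simpa using by omega
  · exact pvHexDigits_length_le n.toNat 4 (by omega) (by omega)

theorem pvPad4_eq (s : List Char) (h : s.length ≤ 4) :
    pvPad4 s = List.replicate (4 - s.length) '0' ++ s := by
  by_cases h1 : s.length = 4
  · rw [pvPad4]; simp [h1]
  · by_cases h2 : s.length = 3
    · rw [pvPad4, if_pos (by omega), pvPad4]; simp [h2]
    · by_cases h3 : s.length = 2
      · rw [pvPad4, if_pos (by omega), pvPad4, if_pos (by simp; omega), pvPad4]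
        simp [h3, List.replicate]
      · by_cases h4 : s.length = 1
        · rw [pvPad4, if_pos (by omega), pvPad4, if_pos (by simp; omega),
            pvPad4, if_pos (by simp; omega), pvPad4]
          simp [h4, List.replicate]
        · have h0 : s.length = 0 := by omega
          rw [pvPad4, if_pos (by omega), pvPad4, if_pos (by simp; omega),
            pvPad4, if_pos (by simp; omega), pvPad4, if_pos (by simp; omega), pvPad4]
          simp [h0, List.replicate]

-- the full 63-byte block A's loop appends per iteration
def pvBlock : List Char := ['3', 'e'] ++ List.flatten (List.replicate 62 ['6', '9'])

-- closed-form number of iterations of A's while-loop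
def pvK (tmp : Int) : Int := max 0 (-(PySem.Int.floordiv (-tmp) 63) - 1)

theorem pvK_nonpos (tmp : Int) (h : tmp ≤ 63) : pvK tmp = 0 := by
  unfold pvK
  have : -(PySem.Int.floordiv (-tmp) 63) ≤ 1 := by
    have := (PySem.Int.neg_floordiv_neg_eq_iff_of_pos (a := tmp) (b := 63)
      (q := -(PySem.Int.floordiv (-tmp) 63)) (by omega)).mp rfl
    omega
  omega

theorem pvK_succ (tmp : Int) (h : 63 < tmp) : pvK tmp = pvK (tmp - 63) + 1 := by
  unfold pvK
  set q := -(PySem.Int.floordiv (-tmp) 63) with hq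
  have hb : (q - 1) * 63 < tmp ∧ tmp ≤ q * 63 :=
    (PySem.Int.neg_floordiv_neg_eq_iff_of_pos (a := tmp) (b := 63) (q := q) (by omega)).mp rfl
  have hq1 : -(PySem.Int.floordiv (-(tmp - 63)) 63) = q - 1 := by
    rw [PySem.Int.neg_floordiv_neg_eq_iff_of_pos (by omega)]
    constructor <;> nlinarith [hb.1, hb.2]
  rw [hq1]
  have hq2 : 2 ≤ q := by nlinarith [hb.1]
  omega

theorem pvBlockLoop_eq (tmp : Int) (data : List Char) :
    pvBlockLoop tmp data = (tmp - 63 * pvK tmp, data ++ List.flatten (List.replicate (pvK tmp).toNat pvBlock)) := by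
  by_cases h : tmp > 63
  · have hrec := pvBlockLoop_eq (tmp - 63)
      ((List.range 62).foldl (fun d _ => d ++ ['6', '9']) (data ++ ['3', 'e']))
    rw [pvBlockLoop, dif_pos h, hrec, foldl_range_append, pvK_succ tmp h]
    have hk0 : 0 ≤ pvK (tmp - 63) := le_max_left 0 _
    simp only [Prod.mk.injEq]
    constructor
    · omega
    · have : (pvK (tmp - 63) + 1).toNat = (pvK (tmp - 63)).toNat + 1 := by omega
      rw [this, List.replicate_succ, List.flatten_cons]
      show data ++ ['3', 'e'] ++ List.flatten (List.replicate 62 ['6', '9']) ++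
          (List.replicate (pvK (tmp - 63)).toNat pvBlock).flatten =
        data ++ ((['3', 'e'] ++ List.flatten (List.replicate 62 ['6', '9'])) ++
          (List.replicate (pvK (tmp - 63)).toNat pvBlock).flatten)
      simp [List.append_assoc]
  · rw [pvBlockLoop, dif_neg h, pvK_nonpos tmp (by omega)]
    simp
termination_by tmp.toNat
decreasing_by omega

theorem toNat_max_zero (x : Int) : (max 0 x).toNat = x.toNat := by omega

-- ===== VERDICT (by name: the statement is the Claim_ definition above) =====
theorem biggen_spec : Claim_equal_biggen := by
  intro size _ hpre
  obtain ⟨h1, h2⟩ := hpre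
  unfold Spec_biggen biggen biggen_alt
  simp only [pvBlockLoop_eq, foldl_range_append, pvPad4_eq _ (pvHexSlice2_length_le size h1 h2)]
  have hk : pvK size = max 0 (-(PySem.Int.floordiv (-size) 63) - 1) := rfl
  rw [← hk, toNat_max_zero]
  simp [pvBlock]
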